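-- pv_equiv track=rewrite | github.com/pedro-starlight/insurance-agent | backend/app/services/webhook_service.py | parse_signature_header
-- ===== SOURCE A (Python) =====
-- from typing import Tuple, Optional, Dict, List
--
-- def parse_signature_header(signature_header: str) -> Tuple[Optional[str], Optional[str]]:
--     """
--     Parse the elevenlabs-signature header format: t=timestamp,v0=signature
--
--     Args:
--         signature_header: The elevenlabs-signature header value
--
--     Returns:
--         Tuple of (signature, timestamp) or (None, None) if parsing fails
--     """
--     signature = None
--     timestamp = None
--
--     signature_parts = signature_header.split(",")
--     for part in signature_parts:
--         if part.startswith("v0="):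
--             signature = part.split("=", 1)[1]
--         elif part.startswith("t="):
--             timestamp = part.split("=", 1)[1]
--
--     return signature, timestamp
-- ===== SOURCE B (Python) =====
-- from typing import Tuple, Optional
--
--
-- def parse_signature_header(signature_header: str) -> Tuple[Optional[str], Optional[str]]:
--     d = dict(p.split("=", 1) for p in signature_header.split(",") if "=" in p)
--     return d.get("v0"), d.get("t")
-- ===== Notes on version B (the rewrite author's own statement) =====
-- stated objective: idiomatic
-- what changed: Replaces the per-part prefix-branching loop with a one-pass dict of all key=value pairs followed by two direct lookups d.get('v0'), d.get('t').
import Mathlib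
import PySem

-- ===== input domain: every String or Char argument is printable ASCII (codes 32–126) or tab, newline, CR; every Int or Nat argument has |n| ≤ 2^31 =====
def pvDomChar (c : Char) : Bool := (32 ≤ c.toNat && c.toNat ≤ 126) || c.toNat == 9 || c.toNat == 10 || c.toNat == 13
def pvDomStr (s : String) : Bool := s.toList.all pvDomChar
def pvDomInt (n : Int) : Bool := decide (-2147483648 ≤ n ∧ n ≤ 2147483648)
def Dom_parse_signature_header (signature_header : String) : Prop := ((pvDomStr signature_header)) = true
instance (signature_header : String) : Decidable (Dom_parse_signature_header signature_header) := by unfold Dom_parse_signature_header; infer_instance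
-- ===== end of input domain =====

-- B rebuilds A's prefix-branching scan as a one-pass key=value dictionary plus two direct lookups (idiomatic; same cost).

-- ===== PORT A =====
-- part.split("=", 1)[1]; the .getD "" totalizes the [1] index, which is never out of range
-- on the branches where A reads it (the part starts with "v0=" / "t=", so "=" occurs).
def pvPartA (st : Option String × Option String) (part : String) : Option String × Option String :=
  if PySem.Str.startswith part "v0=" then
    ((PySem.List.pyGet? ((PySem.Str.splitMax? part "=" 1).getD []) 1).getD "", st.2)
  else if PySem.Str.startswith part "t=" then
    (st.1, (PySem.List.pyGet? ((PySem.Str.splitMax? part "=" 1).getD []) 1).getD "")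
  else st

def parse_signature_header (signature_header : String) : Option String × Option String :=
  let signature_parts := (PySem.Str.split? signature_header ",").getD []
  signature_parts.foldl pvPartA ((none : Option String), (none : Option String))

-- ===== PORT B =====
-- dict(p.split("=", 1) for p in signature_header.split(",") if "=" in p): with "=" in p,
-- split("=", 1) yields exactly a [key, value] pair, inserted into the dict (last wins).
def pvKV (d : PySem.Dict String String) : List String → PySem.Dict String String
  | k :: v :: _ => d.insert k v
  | _ => d

def pvPartB (d : PySem.Dict String String) (p : String) : PySem.Dict String String :=
  if PySem.Str.isIn "=" p then pvKV d ((PySem.Str.splitMax? p "=" 1).getD []) else d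

def parse_signature_header_alt (signature_header : String) : Option String × Option String :=
  let d := ((PySem.Str.split? signature_header ",").getD []).foldl pvPartB PySem.Dict.empty
  (d.get? "v0", d.get? "t")

-- ===== PRECONDITION & SPEC =====
def Spec_parse_signature_header (signature_header : String) (out : Option String × Option String) : Prop := out = parse_signature_header_alt signature_header
instance (signature_header : String) (out : Option String × Option String) : Decidable (Spec_parse_signature_header signature_header out) := by unfold Spec_parse_signature_header; infer_instance

-- ===== CLAIM (what is proved, stated in full; the proofs are below) =====
def Claim_equal_parse_signature_header : Prop := ∀ (signature_header : String), Dom_parse_signature_header signature_header → Spec_parse_signature_header signature_header (parse_signature_header signature_header)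

-- ===== LEMMAS AND PROOFS =====

-- go with maxsplit counter 0 stops immediately.
theorem pv_go_zero (sep : List Char) (fuel : Nat) (l cur : List Char) (acc : List (List Char)) :
    PySem.Chars.splitOnMax.go sep fuel 0 l cur acc = acc.reverse ++ [cur.reverse ++ l] := by
  cases fuel with
  | zero => simp [PySem.Chars.splitOnMax.go]
  | succ n => cases l with
    | nil => simp [PySem.Chars.splitOnMax.go]
    | cons c rest => simp [PySem.Chars.splitOnMax.go]

-- go with counter 1 on a chunk containing '=' splits at the first '='.
theorem pv_go_sep (fuel : Nat) (l cur : List Char) (acc : List (List Char))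
    (h : '=' ∈ l) (hf : l.length ≤ fuel) :
    PySem.Chars.splitOnMax.go ['='] fuel 1 l cur acc =
      acc.reverse ++ [cur.reverse ++ l.takeWhile (fun c => !(c == '=')),
        (l.dropWhile (fun c => !(c == '='))).tail] := by
  induction fuel generalizing l cur with
  | zero =>
    have : l = [] := List.length_eq_zero_iff.mp (Nat.le_zero.mp hf)
    subst this; simp at h
  | succ n ih =>
    cases l with
    | nil => simp at h
    | cons c rest =>
      by_cases hc : c = '='
      · subst hc
        have hpre : List.isPrefixOf ['='] ('=' :: rest) = true := by simp [List.isPrefixOf]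
        rw [PySem.Chars.splitOnMax.go]
        simp only [hpre, if_true, Nat.one_ne_zero, if_false]
        rw [pv_go_zero]
        simp
      · have hpre : List.isPrefixOf ['='] (c :: rest) = false := by
          simp [List.isPrefixOf]; exact fun hh => (hc hh.symm).elim
        have hrest : '=' ∈ rest := by
          rcases List.mem_cons.mp h with h1 | h1
          · exact absurd h1.symm hc
          · exact h1
        rw [PySem.Chars.splitOnMax.go]
        simp only [hpre, if_false, Nat.one_ne_zero, if_false]
        rw [ih rest (c :: cur) hrest (by simpa using Nat.le_of_succ_le_succ hf)]
        simp [hc]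

theorem pv_splitOnMax_mem (cs : List Char) (h : '=' ∈ cs) :
    PySem.Chars.splitOnMax cs ['='] 1 =
      [cs.takeWhile (fun c => !(c == '=')), (cs.dropWhile (fun c => !(c == '='))).tail] := by
  unfold PySem.Chars.splitOnMax
  rw [if_neg (by norm_num)]
  rw [show (1 : Int).toNat = 1 from rfl, pv_go_sep (cs.length + 1) cs [] [] h (Nat.le_succ _)]
  simp

theorem pv_isIn_eq (p : String) : PySem.Str.isIn "=" p = true ↔ '=' ∈ p.toList := by
  rw [PySem.Str.isIn_iff_infix]
  constructor
  · rintro ⟨s, t, hst⟩; rw [← hst]; simp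
  · intro hm
    obtain ⟨s, t, hst⟩ := List.append_of_mem hm
    exact ⟨s, t, by rw [hst]; simp⟩

-- the head of a nonempty dropWhile fails the predicate
theorem pv_dropWhile_cons (p : Char → Bool) (cs tl : List Char) (a : Char)
    (h : cs.dropWhile p = a :: tl) : p a = false := by
  induction cs with
  | nil => simp at h
  | cons c r ih =>
    rw [List.dropWhile_cons] at h
    cases hc : p c with
    | true => rw [hc] at h; exact ih (by simpa using h)
    | false =>
      rw [hc] at h
      simp only [Bool.false_eq_true, if_false] at h
      injection h with h1 h2
      rw [← h1]
      exact hc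

-- decomposition of cs at the first '='
theorem pv_decomp (cs : List Char) (h : '=' ∈ cs) :
    cs = cs.takeWhile (fun c => !(c == '=')) ++ '=' :: (cs.dropWhile (fun c => !(c == '='))).tail := by
  have h2 := List.takeWhile_append_dropWhile (p := fun c => !(c == '=')) (l := cs)
  cases hEq : cs.dropWhile (fun c => !(c == '=')) with
  | nil =>
    exfalso
    have hall := List.dropWhile_eq_nil_iff.mp hEq
    have := hall '=' h
    simp at this
  | cons a tl =>
    have ha : a = '=' := by
      have := pv_dropWhile_cons (fun c => !(c == '=')) cs tl a hEq
      simpa using this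
    conv_lhs => rw [← h2]
    rw [hEq, ha]
    rfl

-- takeWhile over a key free of '=' followed by '=' returns the key
theorem pv_takeWhile_key (k t : List Char) (hk : '=' ∉ k) :
    (k ++ '=' :: t).takeWhile (fun c => !(c == '=')) = k := by
  induction k with
  | nil => simp
  | cons c r ih =>
    have hc : c ≠ '=' := fun hh => hk (hh ▸ List.mem_cons_self)
    simp [hc, ih (fun hm => hk (List.mem_cons_of_mem _ hm))]

-- startswith "k=" iff '=' occurs and the chunk before the first '=' is k (for k free of '=')
theorem pv_startswith_iff (cs k : List Char) (hk : '=' ∉ k) :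
    PySem.Chars.startswith cs (k ++ ['=']) = true ↔
      '=' ∈ cs ∧ cs.takeWhile (fun c => !(c == '=')) = k := by
  rw [PySem.Chars.startswith, List.isPrefixOf_iff_prefix]
  constructor
  · rintro ⟨t, rfl⟩
    rw [List.append_assoc]
    exact ⟨by simp, pv_takeWhile_key k t hk⟩
  · rintro ⟨hm, hkv⟩
    refine ⟨(cs.dropWhile (fun c => !(c == '='))).tail, ?_⟩
    conv_rhs => rw [pv_decomp cs hm]
    rw [hkv, List.append_assoc]
    rfl

-- the main fold invariant: A's running pair is B's dict looked up at "v0" and "t"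
theorem pv_fold_inv (parts : List String) (d : PySem.Dict String String) :
    parts.foldl pvPartA (d.get? "v0", d.get? "t") =
      (((parts.foldl pvPartB d).get? "v0"), ((parts.foldl pvPartB d).get? "t")) := by
  induction parts generalizing d with
  | nil => simp
  | cons p rest ih =>
    simp only [List.foldl_cons]
    suffices hstep : pvPartA (d.get? "v0", d.get? "t") p = ((pvPartB d p).get? "v0", (pvPartB d p).get? "t") by
      rw [hstep]; exact ih (pvPartB d p)
    by_cases hv : PySem.Str.startswith p "v0=" = true
    · have := (pv_startswith_iff p.toList ['v', '0'] (by decide)).mp (by rw [PySem.Str.startswith, show ("v0=" : String).toList = ['v', '0'] ++ ['='] by decide] at hv; exact hv)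
      obtain ⟨hm, htk⟩ := this
      have hsplit : (PySem.Str.splitMax? p "=" 1).getD [] =
          ["v0", String.ofList ((p.toList.dropWhile (fun c => !(c == '='))).tail)] := by
        simp only [PySem.Str.splitMax?, PySem.Chars.splitMax?]
        rw [if_neg (by simp)]
        rw [show ("=" : String).toList = ['='] from rfl, pv_splitOnMax_mem p.toList hm, htk]
        rfl
      have hin : PySem.Str.isIn "=" p = true := (pv_isIn_eq p).mpr hm
      simp only [pvPartA, pvPartB]
      rw [if_pos hv, if_pos hin, hsplit]
      simp only [pvKV, Prod.mk.injEq]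
      refine ⟨?_, ?_⟩
      · simp [PySem.List.pyGet?, PySem.List.pyIdx?, PySem.Dict.get?_insert_self]
      · rw [PySem.Dict.get?_insert_of_ne _ _ (by decide)]
    · by_cases ht : PySem.Str.startswith p "t=" = true
      · have := (pv_startswith_iff p.toList ['t'] (by decide)).mp (by rw [PySem.Str.startswith, show ("t=" : String).toList = ['t'] ++ ['='] by decide] at ht; exact ht)
        obtain ⟨hm, htk⟩ := this
        have hsplit : (PySem.Str.splitMax? p "=" 1).getD [] =
            ["t", String.ofList ((p.toList.dropWhile (fun c => !(c == '='))).tail)] := by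
          simp only [PySem.Str.splitMax?, PySem.Chars.splitMax?]
          rw [if_neg (by simp)]
          rw [show ("=" : String).toList = ['='] from rfl, pv_splitOnMax_mem p.toList hm, htk]
          rfl
        have hin : PySem.Str.isIn "=" p = true := (pv_isIn_eq p).mpr hm
        simp only [pvPartA, pvPartB]
        rw [if_neg hv, if_pos ht, if_pos hin, hsplit]
        simp only [pvKV, Prod.mk.injEq]
        refine ⟨?_, ?_⟩
        · rw [PySem.Dict.get?_insert_of_ne _ _ (by decide)]
        · simp [PySem.List.pyGet?, PySem.List.pyIdx?, PySem.Dict.get?_insert_self]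
      · by_cases hin : PySem.Str.isIn "=" p = true
        · have hm : '=' ∈ p.toList := (pv_isIn_eq p).mp hin
          have hsplit : (PySem.Str.splitMax? p "=" 1).getD [] =
              [String.ofList (p.toList.takeWhile (fun c => !(c == '='))),
               String.ofList ((p.toList.dropWhile (fun c => !(c == '='))).tail)] := by
            simp only [PySem.Str.splitMax?, PySem.Chars.splitMax?]
            rw [if_neg (by simp)]
            rw [show ("=" : String).toList = ['='] from rfl, pv_splitOnMax_mem p.toList hm]
            rfl
          have hkv : String.ofList (p.toList.takeWhile (fun c => !(c == '='))) ≠ "v0" := by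
            intro hh
            have : p.toList.takeWhile (fun c => !(c == '=')) = ['v', '0'] := by
              have := congrArg String.toList hh; simpa using this
            exact hv ((pv_startswith_iff p.toList ['v', '0'] (by decide)).mpr ⟨hm, this⟩)
          have hkt : String.ofList (p.toList.takeWhile (fun c => !(c == '='))) ≠ "t" := by
            intro hh
            have : p.toList.takeWhile (fun c => !(c == '=')) = ['t'] := by
              have := congrArg String.toList hh; simpa using this
            exact ht ((pv_startswith_iff p.toList ['t'] (by decide)).mpr ⟨hm, this⟩)
          simp only [pvPartA, pvPartB]
          rw [if_neg hv, if_neg ht, if_pos hin, hsplit]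
          simp only [pvKV]
          rw [PySem.Dict.get?_insert_of_ne _ _ (fun hh => hkv hh.symm),
            PySem.Dict.get?_insert_of_ne _ _ (fun hh => hkt hh.symm)]
        · simp only [pvPartA, pvPartB]
          rw [if_neg hv, if_neg ht, if_neg hin]

-- ===== VERDICT (by name: the statement is the Claim_ definition above) =====
theorem parse_signature_header_spec : Claim_equal_parse_signature_header := by
  intro s _
  unfold Spec_parse_signature_header parse_signature_header parse_signature_header_alt
  have := pv_fold_inv ((PySem.Str.split? s ",").getD []) PySem.Dict.empty
  simpa [PySem.Dict.get?_empty] using this
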